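-- pv_equiv track=rewrite | github.com/SurinSeong/algorithm | solving-club/1949_2.py | find_highest_idx
-- ===== SOURCE A (Python) =====
-- def find_max_heights(arr, n):
--     max_height = 0
--     for i in range(n):
--         for j in range(n):
--             max_height = max(max_height, arr[i][j])
--
--     return max_height
--
-- def find_highest_idx(arr, n):
--     idx_list = []
--
--     max_h = find_max_heights(arr, n)
--
--     for i in range(n):
--         for j in range(n):
--             if arr[i][j] == max_h:
--                 idx_list.append([i, j])
--
--     return idx_list
-- ===== SOURCE B (Python) =====
-- def find_highest_idx(arr, n):
--     max_h = 0
--     idx_list = []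
--     for i in range(n):
--         for j in range(n):
--             v = arr[i][j]
--             if v > max_h:
--                 max_h = v
--                 idx_list = [[i, j]]
--             elif v == max_h:
--                 idx_list.append([i, j])
--     return idx_list
-- ===== Notes on version B (the rewrite author's own statement) =====
-- stated objective: faster
-- what changed: A scans the grid twice (one full pass to compute the maximum, a second full pass to collect its indices); B fuses this into a single pass that keeps a running maximum and resets/extends the index list as it goes.
import Mathlib
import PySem

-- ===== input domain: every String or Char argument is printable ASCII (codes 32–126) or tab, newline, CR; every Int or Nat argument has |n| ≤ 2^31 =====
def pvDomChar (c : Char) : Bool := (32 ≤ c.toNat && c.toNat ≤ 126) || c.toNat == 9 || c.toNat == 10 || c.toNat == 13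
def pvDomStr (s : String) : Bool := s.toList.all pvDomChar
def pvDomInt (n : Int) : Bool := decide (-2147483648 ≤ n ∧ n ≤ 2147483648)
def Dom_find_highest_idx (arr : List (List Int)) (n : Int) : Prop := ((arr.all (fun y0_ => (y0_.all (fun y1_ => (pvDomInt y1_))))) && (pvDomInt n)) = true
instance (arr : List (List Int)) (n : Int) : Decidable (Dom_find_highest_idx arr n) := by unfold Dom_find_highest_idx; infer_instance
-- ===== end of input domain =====

-- B fuses A's two grid passes (max, then collect) into a single pass with a running
-- maximum that resets the index list on a strictly greater value (one pass instead of two).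

-- ===== PORT A =====
-- arr[i][j]; exact within Pre_ (both indices are in range there, so the defaults are never used)
def pvCell (arr : List (List Int)) (i j : Int) : Int :=
  PySem.List.pyGetD (PySem.List.pyGetD arr i []) j 0

def find_max_heights (arr : List (List Int)) (n : Int) : Int :=
  (PySem.List.pyRange 0 n 1).foldl
    (fun mh i => (PySem.List.pyRange 0 n 1).foldl
      (fun mh j => max mh (pvCell arr i j)) mh) 0

def find_highest_idx (arr : List (List Int)) (n : Int) : List (List Int) :=
  let max_h := find_max_heights arr n
  (PySem.List.pyRange 0 n 1).foldl
    (fun l i => (PySem.List.pyRange 0 n 1).foldl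
      (fun l j => if pvCell arr i j = max_h then l ++ [[i, j]] else l) l) []

-- ===== PORT B =====
-- one fused pass: state = (running max, index list so far)
def pvStep (arr : List (List Int)) (st : Int × List (List Int)) (i j : Int) :
    Int × List (List Int) :=
  let v := pvCell arr i j
  if v > st.1 then (v, [[i, j]])
  else if v = st.1 then (st.1, st.2 ++ [[i, j]])
  else st

def find_highest_idx_alt (arr : List (List Int)) (n : Int) : List (List Int) :=
  ((PySem.List.pyRange 0 n 1).foldl
    (fun st i => (PySem.List.pyRange 0 n 1).foldl (fun st j => pvStep arr st i j) st)
    (0, [])).2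

-- ===== PRECONDITION & SPEC =====
-- Pre_ excludes exactly the inputs where Python's arr[i][j] raises IndexError:
-- n positive but fewer than n rows, or some of the first n rows shorter than n.
def Pre_find_highest_idx (arr : List (List Int)) (n : Int) : Prop :=
  n ≤ 0 ∨ (n ≤ (arr.length : Int) ∧ ∀ row ∈ arr.take n.toNat, n ≤ (row.length : Int))
instance (arr : List (List Int)) (n : Int) : Decidable (Pre_find_highest_idx arr n) := by
  unfold Pre_find_highest_idx; infer_instance
def pvWitness_find_highest_idx : List (List Int) × Int := ([[1, 2], [3, 3]], 2)

def Spec_find_highest_idx (arr : List (List Int)) (n : Int) (out : List (List Int)) : Prop := out = find_highest_idx_alt arr n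
instance (arr : List (List Int)) (n : Int) (out : List (List Int)) : Decidable (Spec_find_highest_idx arr n out) := by unfold Spec_find_highest_idx; infer_instance

-- ===== CLAIM (what is proved, stated in full; the proofs are below) =====
def Claim_equal_find_highest_idx : Prop := ∀ (arr : List (List Int)) (n : Int), Dom_find_highest_idx arr n → Pre_find_highest_idx arr n → Spec_find_highest_idx arr n (find_highest_idx arr n)

-- ===== LEMMAS AND PROOFS =====

-- fold over a flatMap is the nested fold
theorem pv_foldl_flatMap {α β γ : Type} (l : List α) (g : α → List β) (f : γ → β → γ) :
    ∀ (b : γ), (l.flatMap g).foldl f b = l.foldl (fun b a => (g a).foldl f b) b := by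
  induction l with
  | nil => intro b; rfl
  | cons x xs ih =>
    intro b
    simp [List.flatMap_cons, List.foldl_append, ih]

def pvCells (n : Int) : List (Int × Int) :=
  (PySem.List.pyRange 0 n 1).flatMap (fun i => (PySem.List.pyRange 0 n 1).map (fun j => (i, j)))

-- any nested loop over the two ranges is the fold over pvCells
theorem pv_nested_eq_cells {γ : Type} (n : Int) (f : γ → Int → Int → γ) (init : γ) :
    (PySem.List.pyRange 0 n 1).foldl
      (fun b i => (PySem.List.pyRange 0 n 1).foldl (fun b j => f b i j) b) init
    = (pvCells n).foldl (fun b c => f b c.1 c.2) init := by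
  rw [pvCells, pv_foldl_flatMap]
  apply PySem.List.foldl_congr_mem
  intro b i _
  rw [List.foldl_map]

-- the fused pass computed from an arbitrary state, characterised
theorem pv_foldB (g : Int × Int → Int) (cs : List (Int × Int)) :
    ∀ (m : Int) (l : List (List Int)),
    cs.foldl (fun st c =>
        if g c > st.1 then (g c, [[c.1, c.2]])
        else if g c = st.1 then (st.1, st.2 ++ [[c.1, c.2]])
        else st) (m, l)
    = (cs.foldl (fun a c => max a (g c)) m,
       (if cs.foldl (fun a c => max a (g c)) m = m then l else []) ++
         (cs.filter (fun c => g c = cs.foldl (fun a c => max a (g c)) m)).map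
           (fun c => [c.1, c.2])) := by
  induction cs with
  | nil => intro m l; simp
  | cons c cs ih =>
    intro m l
    have hle : ∀ (m₀ : Int), m₀ ≤ cs.foldl (fun a c => max a (g c)) m₀ :=
      fun m₀ => (PySem.List.le_foldl_max_int cs g m₀).1
    by_cases h1 : g c > m
    · have hmax : max m (g c) = g c := by omega
      simp only [List.foldl_cons, if_pos h1, ih, hmax]
      have hM : g c ≤ cs.foldl (fun a c => max a (g c)) (g c) := hle (g c)
      refine congrArg₂ Prod.mk rfl ?_
      · by_cases h2 : cs.foldl (fun a c => max a (g c)) (g c) = g c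
        · rw [if_pos h2, if_neg (by omega), List.filter_cons,
            if_pos (by simpa using h2.symm)]
          simp
        · rw [if_neg h2, if_neg (by omega), List.filter_cons,
            if_neg (by simpa using fun h => h2 h.symm)]
    · by_cases h2 : g c = m
      · have hmax : max m (g c) = m := by omega
        simp only [List.foldl_cons, if_neg h1, if_pos h2, ih, hmax]
        refine congrArg₂ Prod.mk rfl ?_
        · by_cases h3 : cs.foldl (fun a c => max a (g c)) m = m
          · rw [if_pos h3, if_pos h3, List.filter_cons, if_pos (by simp [h2, h3])]
            simp
          · have hne : ¬ (g c = cs.foldl (fun a c => max a (g c)) m) := by omega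
            rw [if_neg h3, if_neg h3]
            simp [hne]
      · have hmax : max m (g c) = m := by omega
        simp only [List.foldl_cons, if_neg h1, if_neg h2, ih, hmax]
        have hM : m ≤ cs.foldl (fun a c => max a (g c)) m := hle m
        refine congrArg₂ Prod.mk rfl ?_
        · have hne : ¬ (g c = cs.foldl (fun a c => max a (g c)) m) := by omega
          simp [hne]

-- ===== VERDICT (by name: the statement is the Claim_ definition above) =====
theorem find_highest_idx_spec : Claim_equal_find_highest_idx := by
  intro arr n _ _
  unfold Spec_find_highest_idx find_highest_idx find_highest_idx_alt find_max_heights pvStep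
  rw [pv_nested_eq_cells n (fun mh i j => max mh (pvCell arr i j)) 0,
    pv_nested_eq_cells n
      (fun l i j => if pvCell arr i j = (pvCells n).foldl (fun b c => max b (pvCell arr c.1 c.2)) 0 then l ++ [[i, j]] else l) [],
    pv_nested_eq_cells n (fun st i j =>
      if pvCell arr i j > st.1 then (pvCell arr i j, [[i, j]])
      else if pvCell arr i j = st.1 then (st.1, st.2 ++ [[i, j]])
      else st) ((0 : Int), ([] : List (List Int))),
    pv_foldB (fun c => pvCell arr c.1 c.2) (pvCells n) 0 []]
  rw [PySem.List.foldl_append_ite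
    (p := fun c : Int × Int => pvCell arr c.1 c.2 = (pvCells n).foldl (fun b c => max b (pvCell arr c.1 c.2)) 0)
    (f := fun c : Int × Int => [c.1, c.2])]
  simp
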